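-- pv_equiv track=rewrite | github.com/kenbockler/Andmeteaduse_masin-ppe_projekt | PROJEKT/K10/S087/2021-11-03-17-06-09/kodu1.py | grupeeri
-- ===== SOURCE A (Python) =====
-- def sümbolite_sagedus(sõne2):
--     sõnastik = {}
--     for täht in sõne2:
--         sõnastik[täht] = sõnastik.get(täht, 0) + 1
--     return sõnastik
--
-- def grupeeri(sõne3):
--     sõnastik1 = {}
--     sõnastik1["Täishäälikud"] = set()
--     sõnastik1["Kaashäälikud"] = set()
--     sõnastik1["Muud"] = set()
--     x = sümbolite_sagedus(sõne3)
--     täishäälikud = "AEIOUÄÕÜÖaeiouõäöü"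
--     kaashäälikud = "BCDFGHJKLMNPRSŠZŽTVWXYQbcdfghjklmnprsšzžtvwxqy"
--     for häälik in x:
--         if häälik in täishäälikud:
--             ennik = (häälik, x.get(häälik))
--             sõnastik1["Täishäälikud"].add(ennik)
--         elif häälik in kaashäälikud:
--             ennik2 = (häälik, x.get(häälik))
--             sõnastik1["Kaashäälikud"].add(ennik2)
--         else:
--             ennik3 = (häälik, x.get(häälik))
--             sõnastik1["Muud"].add(ennik3)
--     return sõnastik1
-- ===== SOURCE B (Python) =====
-- def grupeeri(sõne3):
--     täishäälikud = "AEIOUÄÕÜÖaeiouõäöü"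
--     kaashäälikud = "BCDFGHJKLMNPRSŠZŽTVWXYQbcdfghjklmnprsšzžtvwxqy"
--     vok, kon, muu = {}, {}, {}
--     for täht in sõne3:
--         if täht in täishäälikud:
--             sihtkoht = vok
--         elif täht in kaashäälikud:
--             sihtkoht = kon
--         else:
--             sihtkoht = muu
--         sihtkoht[täht] = sihtkoht.get(täht, 0) + 1
--     return {"Täishäälikud": set(vok.items()),
--             "Kaashäälikud": set(kon.items()),
--             "Muud": set(muu.items())}
-- ===== Notes on version B (the rewrite author's own statement) =====
-- stated objective: alternative
-- what changed: B replaces A's two-phase shape (count all characters into one dict, then reclassify every distinct character in a second loop) with a single pass that routes each character into one of three per-category dicts and builds each result set directly from its dict's items.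
import Mathlib
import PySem

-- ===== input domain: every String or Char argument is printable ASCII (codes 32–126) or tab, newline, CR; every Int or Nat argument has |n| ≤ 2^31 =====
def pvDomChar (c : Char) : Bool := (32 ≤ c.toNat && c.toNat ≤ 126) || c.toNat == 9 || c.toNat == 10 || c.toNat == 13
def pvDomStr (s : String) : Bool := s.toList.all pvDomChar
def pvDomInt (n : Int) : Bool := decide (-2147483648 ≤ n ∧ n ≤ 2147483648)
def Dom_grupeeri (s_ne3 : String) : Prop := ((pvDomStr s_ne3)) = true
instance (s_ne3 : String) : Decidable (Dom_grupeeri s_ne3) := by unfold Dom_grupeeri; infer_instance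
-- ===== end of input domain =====

-- B fuses A's count-then-classify phases into one pass over the string routing each
-- character into a per-category dict (objective: alternative decomposition, same cost).


-- ===== PORT A =====
-- the two constant strings, as their character lists
def pvVok : List Char := "AEIOUÄÕÜÖaeiouõäöü".toList
def pvKon : List Char := "BCDFGHJKLMNPRSŠZŽTVWXYQbcdfghjklmnprsšzžtvwxqy".toList

-- helper sümbolite_sagedus: dict of character frequencies (sõnastik[täht] = sõnastik.get(täht,0)+1)
def sümbolite_sagedus (cs : List Char) : PySem.Dict Char Int :=
  cs.foldl (fun d c => d.insert c (d.getD c 0 + 1)) PySem.Dict.empty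

-- 'häälik in täishäälikud' on a single character is exactly character membership
def grupeeri (s_ne3 : String) : List (String × List (String × Int)) :=
  let x := sümbolite_sagedus s_ne3.toList
  let r := x.keys.foldl
    (fun (acc : PySem.Set (String × Int) × PySem.Set (String × Int) × PySem.Set (String × Int)) c =>
      if pvVok.contains c then
        (PySem.Set.add acc.1 (String.ofList [c], x.getD c 0), acc.2.1, acc.2.2)
      else if pvKon.contains c then
        (acc.1, PySem.Set.add acc.2.1 (String.ofList [c], x.getD c 0), acc.2.2)
      else
        (acc.1, acc.2.1, PySem.Set.add acc.2.2 (String.ofList [c], x.getD c 0)))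
    (PySem.Set.empty, PySem.Set.empty, PySem.Set.empty)
  [("Täishäälikud", r.1), ("Kaashäälikud", r.2.1), ("Muud", r.2.2)]

-- ===== PORT B =====
def grupeeri_alt (s_ne3 : String) : List (String × List (String × Int)) :=
  let r := s_ne3.toList.foldl
    (fun (acc : PySem.Dict Char Int × PySem.Dict Char Int × PySem.Dict Char Int) c =>
      if pvVok.contains c then
        (acc.1.insert c (acc.1.getD c 0 + 1), acc.2.1, acc.2.2)
      else if pvKon.contains c then
        (acc.1, acc.2.1.insert c (acc.2.1.getD c 0 + 1), acc.2.2)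
      else
        (acc.1, acc.2.1, acc.2.2.insert c (acc.2.2.getD c 0 + 1)))
    (PySem.Dict.empty, PySem.Dict.empty, PySem.Dict.empty)
  [("Täishäälikud", PySem.Set.ofList (r.1.items.map (fun p => (String.ofList [p.1], p.2)))),
   ("Kaashäälikud", PySem.Set.ofList (r.2.1.items.map (fun p => (String.ofList [p.1], p.2)))),
   ("Muud", PySem.Set.ofList (r.2.2.items.map (fun p => (String.ofList [p.1], p.2))))]

-- ===== PRECONDITION & SPEC =====
def Spec_grupeeri (s_ne3 : String) (out : List (String × List (String × Int))) : Prop := out = grupeeri_alt s_ne3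
instance (s_ne3 : String) (out : List (String × List (String × Int))) : Decidable (Spec_grupeeri s_ne3 out) := by unfold Spec_grupeeri; infer_instance

-- ===== CLAIM (what is proved, stated in full; the proofs are below) =====
def Claim_equal_grupeeri : Prop := ∀ (s_ne3 : String), Dom_grupeeri s_ne3 → Spec_grupeeri s_ne3 (grupeeri s_ne3)

-- ===== LEMMAS AND PROOFS =====

-- a fold whose step routes each element into one of three components splits into three folds over filters
theorem pv_foldl_route {α β γ : Type} (p q : Char → Bool)
    (f : α → Char → α) (g : β → Char → β) (h : γ → Char → γ) :
    ∀ (ks : List Char) (a : α) (b : β) (c : γ),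
    ks.foldl (fun acc x =>
        if p x then (f acc.1 x, acc.2.1, acc.2.2)
        else if q x then (acc.1, g acc.2.1 x, acc.2.2)
        else (acc.1, acc.2.1, h acc.2.2 x)) (a, b, c)
      = ((ks.filter p).foldl f a,
         (ks.filter (fun x => !p x && q x)).foldl g b,
         (ks.filter (fun x => !p x && !q x)).foldl h c) := by
  intro ks
  induction ks with
  | nil => intro a b c; simp
  | cons x t ih =>
    intro a b c
    by_cases hp : p x = true
    · simp [hp, ih]
    · by_cases hq : q x = true
      · simp [hp, hq, ih]
      · simp [hp, hq, ih]

-- folding Set.add of injective images over a Nodup list just appends the mapped list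
theorem pv_foldl_add_eq_append {ι β : Type} [BEq β] [LawfulBEq β]
    (f : ι → β) (hinj : ∀ a b, f a = f b → a = b) :
    ∀ (ks : List ι) (acc : PySem.Set β), ks.Nodup → (∀ c ∈ ks, f c ∉ acc) →
    ks.foldl (fun s c => PySem.Set.add s (f c)) acc = acc ++ ks.map f := by
  intro ks
  induction ks with
  | nil => intro acc _ _; simp
  | cons x t ih =>
    intro acc hnd hfresh
    have hx : f x ∉ acc := hfresh x (by simp)
    have hstep : PySem.Set.add acc (f x) = acc ++ [f x] := PySem.Set.add_of_not_mem hx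
    simp only [List.foldl_cons, hstep]
    rw [ih (acc ++ [f x]) (by simpa using hnd.of_cons)]
    · simp
    · intro c hc
      simp only [List.mem_append, List.mem_singleton]
      rintro (hm | he)
      · exact hfresh c (by simp [hc]) hm
      · have := hinj c x he
        subst this
        exact (List.nodup_cons.mp hnd).1 hc

-- filtering commutes with building a PySem.Set
theorem pv_filter_foldl_add (p : Char → Bool) :
    ∀ (cs : List Char) (acc : PySem.Set Char),
    (cs.foldl PySem.Set.add acc).filter p = (cs.filter p).foldl PySem.Set.add (acc.filter p) := by
  intro cs
  induction cs with
  | nil => intro acc; simp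
  | cons x t ih =>
    intro acc
    by_cases hp : p x = true
    · by_cases hm : x ∈ acc
      · have h1 : PySem.Set.add acc x = acc := PySem.Set.add_of_mem hm
        have h2 : PySem.Set.add (acc.filter p) x = acc.filter p :=
          PySem.Set.add_of_mem (List.mem_filter.mpr ⟨hm, hp⟩)
        simp [hp, h1, h2, ih]
      · have hm' : x ∉ acc.filter p := fun hc => hm (List.mem_filter.mp hc).1
        have h1 : PySem.Set.add acc x = acc ++ [x] := PySem.Set.add_of_not_mem hm
        have h2 : PySem.Set.add (acc.filter p) x = acc.filter p ++ [x] :=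
          PySem.Set.add_of_not_mem hm'
        simp [hp, h1, h2, ih, List.filter_append]
    · by_cases hm : x ∈ acc
      · have h1 : PySem.Set.add acc x = acc := PySem.Set.add_of_mem hm
        simp [hp, h1, ih]
      · have h1 : PySem.Set.add acc x = acc ++ [x] := PySem.Set.add_of_not_mem hm
        simp [hp, h1, ih, List.filter_append]

theorem pv_filter_ofList (p : Char → Bool) (cs : List Char) :
    (PySem.Set.ofList cs).filter p = PySem.Set.ofList (cs.filter p) := by
  have := pv_filter_foldl_add p cs PySem.Set.empty
  simpa [PySem.Set.ofList, PySem.Set.empty] using this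

-- a Nodup list is already its own set
theorem pv_ofList_of_nodup {β : Type} [BEq β] [LawfulBEq β]
    (ys : List β) (h : ys.Nodup) : PySem.Set.ofList ys = ys := by
  have := pv_foldl_add_eq_append (id : β → β) (fun a b hab => hab) ys [] h (by simp)
  simpa [PySem.Set.ofList, PySem.Set.empty, id] using this

theorem pv_mk_inj_pair (cnt : Char → Int) :
    ∀ a b : Char, (String.ofList [a], cnt a) = (String.ofList [b], cnt b) → a = b := by
  intro a b h
  have h1 : String.ofList [a] = String.ofList [b] := congrArg Prod.fst h
  have h2 : [a] = [b] := by simpa using congrArg String.toList h1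
  simpa using h2

-- one category: A's set equals B's set
theorem pv_category (p : Char → Bool) (cs : List Char) :
    ((PySem.Set.ofList cs).filter p).foldl
        (fun s c => PySem.Set.add s (String.ofList [c], (sümbolite_sagedus cs).getD c 0)) []
      = PySem.Set.ofList
          (((sümbolite_sagedus (cs.filter p)).items).map (fun q => (String.ofList [q.1], q.2))) := by
  have hx : sümbolite_sagedus cs = PySem.Dict.counter cs :=
    PySem.Dict.foldl_insert_getD_add_one_eq_counter cs
  have hxf : sümbolite_sagedus (cs.filter p) = PySem.Dict.counter (cs.filter p) :=
    PySem.Dict.foldl_insert_getD_add_one_eq_counter _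
  rw [hxf, PySem.Dict.items_counter, pv_filter_ofList, List.map_map]
  have hnd : (PySem.Set.ofList (cs.filter p)).Nodup := PySem.Set.nodup_ofList _
  have hinj2 : ∀ a b : Char,
      ((fun q : Char × Int => (String.ofList [q.1], q.2)) ∘ fun k => (k, (List.count k (cs.filter p) : Int))) a =
      ((fun q : Char × Int => (String.ofList [q.1], q.2)) ∘ fun k => (k, (List.count k (cs.filter p) : Int))) b → a = b :=
    pv_mk_inj_pair (fun k => (List.count k (cs.filter p) : Int))
  have hnd2 := List.Nodup.map (f := (fun q : Char × Int => (String.ofList [q.1], q.2)) ∘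
      fun k => (k, (List.count k (cs.filter p) : Int))) (fun a b => hinj2 a b) hnd
  rw [pv_foldl_add_eq_append _ (pv_mk_inj_pair (fun c => (sümbolite_sagedus cs).getD c 0)) _ [] hnd (by simp),
      pv_ofList_of_nodup _ hnd2]
  simp only [List.nil_append, Function.comp_def]
  apply List.map_congr_left
  intro c hc
  have hp : p c = true := (List.mem_filter.mp ((PySem.Set.mem_ofList _ _).mp hc)).2
  simp [hx, PySem.Dict.getD_counter, List.count_filter hp]

theorem pv_main (s : String) : grupeeri s = grupeeri_alt s := by
  simp only [grupeeri, grupeeri_alt]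
  have hx : sümbolite_sagedus s.toList = PySem.Dict.counter s.toList :=
    PySem.Dict.foldl_insert_getD_add_one_eq_counter _
  have hkeys : (sümbolite_sagedus s.toList).keys = PySem.Set.ofList s.toList := by
    rw [hx, PySem.Dict.keys_counter]
  rw [hkeys,
      pv_foldl_route (fun c => pvVok.contains c) (fun c => pvKon.contains c)
        (fun t c => PySem.Set.add t (String.ofList [c], (sümbolite_sagedus s.toList).getD c 0))
        (fun t c => PySem.Set.add t (String.ofList [c], (sümbolite_sagedus s.toList).getD c 0))
        (fun t c => PySem.Set.add t (String.ofList [c], (sümbolite_sagedus s.toList).getD c 0))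
        (PySem.Set.ofList s.toList) PySem.Set.empty PySem.Set.empty PySem.Set.empty,
      pv_foldl_route (fun c => pvVok.contains c) (fun c => pvKon.contains c)
        (fun (d : PySem.Dict Char Int) c => d.insert c (d.getD c 0 + 1))
        (fun (d : PySem.Dict Char Int) c => d.insert c (d.getD c 0 + 1))
        (fun (d : PySem.Dict Char Int) c => d.insert c (d.getD c 0 + 1))
        s.toList PySem.Dict.empty PySem.Dict.empty PySem.Dict.empty]
  have hA1 := pv_category (fun c => pvVok.contains c) s.toList
  have hA2 := pv_category (fun c => !pvVok.contains c && pvKon.contains c) s.toList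
  have hA3 := pv_category (fun c => !pvVok.contains c && !pvKon.contains c) s.toList
  simp only [PySem.Set.empty, List.cons.injEq, Prod.mk.injEq]
  exact ⟨⟨trivial, hA1⟩, ⟨trivial, hA2⟩, ⟨trivial, hA3⟩, trivial⟩

-- ===== VERDICT (by name: the statement is the Claim_ definition above) =====
theorem grupeeri_spec : Claim_equal_grupeeri := by
  intro s _
  unfold Spec_grupeeri
  exact pv_main s
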